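-- pv_equiv track=rewrite | github.com/sauravnakarmi/CS383_HW0 | mustard_analytics.py | num_single_locs
-- ===== SOURCE A (Python) =====
-- def num_single_locs(rows):
--     """Return the number of refueling locations that were visited exactly once.
--
--     Hint: store the locations and counts (as keys and values, respectively) in a dictionary,
--     then count up the number of entries with a value equal to one.
--     """
--
--     dict = {}                       # empty dictionary
--     num = 0                         # initial number of unique visits
--
--     for data in rows:               # iterate through rows with data representing tuples
--         location = data[2]          # save location from tuple for readability
--         if location in dict:        # check if location has been logged
--             dict[location] += 1     # increment visit count if yes
--         else:
--             dict[location] = 1      # else log location and set visit count to 1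
--
--     for location in dict:           # iterate throuhg logged locations
--         if dict[location] == 1:     # check if each location has been visited once
--             num += 1                # increment counter
--
--     return num
-- ===== SOURCE B (Python) =====
-- def num_single_locs(rows):
--     """Return the number of refueling locations that were visited exactly once.
--
--     Single pass maintaining two sets: locations seen exactly once so far and
--     locations seen more than once; a repeat visit promotes a location from the
--     first set to the second.
--     """
--     seen_once = set()
--     seen_more = set()
--     for data in rows:
--         location = data[2]
--         if location in seen_once:
--             seen_once.discard(location)
--             seen_more.add(location)
--         elif location in seen_more:
--             pass
--         else:
--             seen_once.add(location)
--     return len(seen_once)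
-- ===== Notes on version B (the rewrite author's own statement) =====
-- stated objective: alternative
-- what changed: Replaces the count dictionary plus a second counting pass over its keys by a single pass that maintains two sets (seen exactly once / seen more than once), promoting a location on its second visit and returning the size of the first set.
import Mathlib
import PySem

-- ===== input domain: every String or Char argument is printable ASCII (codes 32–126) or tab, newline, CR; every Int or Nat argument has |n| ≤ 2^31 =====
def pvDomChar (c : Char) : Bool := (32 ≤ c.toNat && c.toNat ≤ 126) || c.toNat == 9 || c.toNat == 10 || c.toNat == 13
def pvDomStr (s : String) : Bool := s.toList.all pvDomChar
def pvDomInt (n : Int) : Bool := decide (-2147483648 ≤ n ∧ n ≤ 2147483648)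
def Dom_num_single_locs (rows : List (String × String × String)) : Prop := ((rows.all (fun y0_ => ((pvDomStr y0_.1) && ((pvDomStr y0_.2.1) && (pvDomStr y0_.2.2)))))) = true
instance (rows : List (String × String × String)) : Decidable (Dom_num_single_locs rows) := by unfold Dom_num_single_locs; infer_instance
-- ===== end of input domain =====

-- B replaces A's count-dictionary + second counting pass by a single pass over the rows
-- maintaining two sets (seen exactly once / seen more than once); same output, alternative state.


-- ===== PORT A =====
def num_single_locs (rows : List (String × String × String)) : Int :=
  let d : PySem.Dict String Int := rows.foldl (fun d data =>
    let location := data.2.2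
    if d.contains location then
      d.insert location (d.getD location 0 + 1)
    else
      d.insert location 1) PySem.Dict.empty
  d.keys.foldl (fun num location => if d.getD location 0 == 1 then num + 1 else num) (0 : Int)

-- ===== PORT B =====
def num_single_locs_alt (rows : List (String × String × String)) : Int :=
  let st := rows.foldl (fun (st : PySem.Set String × PySem.Set String) data =>
    let location := data.2.2
    if PySem.Set.contains st.1 location then
      (PySem.Set.discard st.1 location, PySem.Set.add st.2 location)
    else if PySem.Set.contains st.2 location then
      st
    else
      (PySem.Set.add st.1 location, st.2)) (PySem.Set.empty, PySem.Set.empty)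
  PySem.Set.len st.1

-- ===== PRECONDITION & SPEC =====
def Spec_num_single_locs (rows : List (String × String × String)) (out : Int) : Prop := out = num_single_locs_alt rows
instance (rows : List (String × String × String)) (out : Int) : Decidable (Spec_num_single_locs rows out) := by unfold Spec_num_single_locs; infer_instance

-- ===== CLAIM (what is proved, stated in full; the proofs are below) =====
def Claim_equal_num_single_locs : Prop := ∀ (rows : List (String × String × String)), Dom_num_single_locs rows → Spec_num_single_locs rows (num_single_locs rows)

-- ===== LEMMAS AND PROOFS =====

-- B's loop body, on the bare location list
def pvStepB (st : PySem.Set String × PySem.Set String) (x : String) :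
    PySem.Set String × PySem.Set String :=
  if PySem.Set.contains st.1 x then
    (PySem.Set.discard st.1 x, PySem.Set.add st.2 x)
  else if PySem.Set.contains st.2 x then
    st
  else
    (PySem.Set.add st.1 x, st.2)

lemma pvCountAppend (l : List String) (x k : String) :
    (l ++ [x]).count k = l.count k + (if k = x then 1 else 0) := by
  rw [List.count_append]
  rcases eq_or_ne k x with rfl | hne
  · simp
  · simp [hne, Ne.symm hne]

-- Invariant of B's loop: the first set is exactly the count-1 locations (in first-occurrence
-- order), the second set holds exactly the locations seen at least twice.
lemma pvInvariantB (l : List String) :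
    (l.foldl pvStepB (PySem.Set.empty, PySem.Set.empty)).1 =
      (PySem.Set.ofList l).filter (fun k => l.count k == 1) ∧
    (∀ k, k ∈ (l.foldl pvStepB (PySem.Set.empty, PySem.Set.empty)).2 ↔ 2 ≤ l.count k) := by
  induction l using List.reverseRecOn with
  | nil => simp [PySem.Set.empty, PySem.Set.ofList]
  | append_singleton l x ih =>
    obtain ⟨h1, h2⟩ := ih
    rw [List.foldl_append, List.foldl_cons, List.foldl_nil]
    set st := l.foldl pvStepB (PySem.Set.empty, PySem.Set.empty) with hst
    have hmem1 : ∀ k, k ∈ st.1 ↔ (k ∈ l ∧ l.count k = 1) := by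
      intro k
      rw [h1]
      simp [List.mem_filter, PySem.Set.mem_ofList]
    rw [PySem.Set.ofList_append_singleton]
    unfold pvStepB
    by_cases hx1 : x ∈ st.1
    · -- second visit: promote from seen-once to seen-more
      obtain ⟨hxl, hcx⟩ := (hmem1 x).1 hx1
      rw [if_pos (by simpa [PySem.Set.contains_iff] using hx1)]
      have hadd : PySem.Set.add (PySem.Set.ofList l) x = PySem.Set.ofList l := by
        simp [PySem.Set.add, PySem.Set.mem_ofList, hxl]
      rw [hadd]
      refine ⟨?_, ?_⟩
      · show PySem.Set.discard st.1 x = _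
        rw [PySem.Set.discard, h1, List.filter_filter]
        apply List.filter_congr
        intro k hk
        rcases eq_or_ne k x with rfl | hne
        · have e1 : List.count k [k] = 1 := by simp
          simp [List.count_append, hcx]
        · have e0 : List.count k [x] = 0 := by simp [Ne.symm hne]
          simp [List.count_append, e0]
          exact fun _ => hne
      · intro k
        show k ∈ PySem.Set.add st.2 x ↔ _
        rw [PySem.Set.mem_add, h2, pvCountAppend]
        rcases eq_or_ne k x with rfl | hne
        · simp [hcx]
        · simp [hne]
    · rw [if_neg (by simpa [PySem.Set.contains_iff] using hx1)]
      by_cases hx2 : x ∈ st.2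
      · -- already seen at least twice: no change
        have hcx : 2 ≤ l.count x := (h2 x).1 hx2
        have hxl : x ∈ l := List.count_pos_iff.mp (by omega)
        rw [if_pos (by simpa [PySem.Set.contains_iff] using hx2)]
        have hadd : PySem.Set.add (PySem.Set.ofList l) x = PySem.Set.ofList l := by
          simp [PySem.Set.add, PySem.Set.mem_ofList, hxl]
        rw [hadd]
        refine ⟨?_, ?_⟩
        · rw [h1]
          apply List.filter_congr
          intro k hk
          rcases eq_or_ne k x with rfl | hne
          · have e1 : List.count k [k] = 1 := by simp
            have hne1 : ¬ List.count k l = 1 := by omega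
            have hne2 : ¬ List.count k l + 1 = 1 := by omega
            simp [List.count_append, hne1]
            omega
          · have e0 : List.count k [x] = 0 := by simp [Ne.symm hne]
            simp [List.count_append, e0]
        · intro k
          rw [h2, pvCountAppend]
          rcases eq_or_ne k x with rfl | hne
          · constructor <;> intro <;> omega
          · simp [hne]
      · -- never seen before: add to seen-once
        rw [if_neg (by simpa [PySem.Set.contains_iff] using hx2)]
        have hcx : l.count x = 0 := by
          by_contra h
          have hpos : 0 < l.count x := Nat.pos_of_ne_zero h
          rcases Nat.lt_or_ge (l.count x) 2 with hlt | hge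
          · exact hx1 ((hmem1 x).2 ⟨List.count_pos_iff.mp hpos, by omega⟩)
          · exact hx2 ((h2 x).2 hge)
        have hxl : x ∉ l := by
          intro h
          have := List.count_pos_iff.mpr h
          omega
        have haddl : PySem.Set.add (PySem.Set.ofList l) x = PySem.Set.ofList l ++ [x] := by
          simp [PySem.Set.add, PySem.Set.mem_ofList, hxl]
        rw [haddl]
        refine ⟨?_, ?_⟩
        · show PySem.Set.add st.1 x = _
          have hadd1 : PySem.Set.add st.1 x = st.1 ++ [x] := by
            simp [PySem.Set.add, hx1]
          rw [hadd1, h1, List.filter_append]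
          congr 1
          · apply List.filter_congr
            intro k hk
            have hne : k ≠ x := by
              rintro rfl
              exact hxl (by simpa [PySem.Set.mem_ofList] using hk)
            have e0 : List.count k [x] = 0 := by simp [Ne.symm hne]
            simp [List.count_append, e0]
          · simp [List.count_append, hcx]
        · intro k
          show k ∈ st.2 ↔ _
          rw [h2, pvCountAppend]
          rcases eq_or_ne k x with rfl | hne
          · simp [hcx]
          · simp [hne]

-- A's two dictionary branches both store the old count plus one, so A's loop builds Counter(locs).
lemma pvDictFoldEq (rows : List (String × String × String)) :
    rows.foldl (fun (d : PySem.Dict String Int) data =>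
        let location := data.2.2
        if d.contains location then
          d.insert location (d.getD location 0 + 1)
        else
          d.insert location 1) PySem.Dict.empty
      = PySem.Dict.counter (rows.map (fun data => data.2.2)) := by
  rw [← PySem.Dict.foldl_insert_getD_add_one_eq_counter, List.foldl_map]
  apply PySem.List.foldl_congr_mem
  intro d data _
  by_cases h : d.contains data.2.2
  · simp [h]
  · have h0 : d.getD data.2.2 0 = 0 :=
      PySem.Dict.getD_of_not_contains d 0 (by simpa using h)
    simp [h, h0]

theorem num_single_locs_spec_aux (rows : List (String × String × String)) :
    num_single_locs rows = num_single_locs_alt rows := by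
  show (rows.foldl (fun (d : PySem.Dict String Int) data =>
        let location := data.2.2
        if d.contains location then d.insert location (d.getD location 0 + 1)
        else d.insert location 1) PySem.Dict.empty).keys.foldl
          (fun num location =>
            if (rows.foldl (fun (d : PySem.Dict String Int) data =>
              let location := data.2.2
              if d.contains location then d.insert location (d.getD location 0 + 1)
              else d.insert location 1) PySem.Dict.empty).getD location 0 == 1
            then num + 1 else num) (0 : Int)
      = PySem.Set.len (rows.foldl (fun (st : PySem.Set String × PySem.Set String) data =>
          let location := data.2.2
          if PySem.Set.contains st.1 location then
            (PySem.Set.discard st.1 location, PySem.Set.add st.2 location)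
          else if PySem.Set.contains st.2 location then st
          else (PySem.Set.add st.1 location, st.2)) (PySem.Set.empty, PySem.Set.empty)).1
  rw [pvDictFoldEq rows]
  set locs := rows.map (fun data => data.2.2) with hlocs
  have hB : rows.foldl (fun (st : PySem.Set String × PySem.Set String) data =>
      let location := data.2.2
      if PySem.Set.contains st.1 location then
        (PySem.Set.discard st.1 location, PySem.Set.add st.2 location)
      else if PySem.Set.contains st.2 location then st
      else (PySem.Set.add st.1 location, st.2)) (PySem.Set.empty, PySem.Set.empty)
      = locs.foldl pvStepB (PySem.Set.empty, PySem.Set.empty) := by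
    rw [hlocs, List.foldl_map]; rfl
  rw [hB, (pvInvariantB locs).1]
  rw [PySem.Dict.keys_counter, PySem.List.foldl_if_add_one]
  simp only [PySem.Set.len, zero_add]
  rw [← List.countP_eq_length_filter]
  congr 1
  apply List.countP_congr
  intro k _
  simp [PySem.Dict.getD_counter]

-- ===== VERDICT (by name: the statement is the Claim_ definition above) =====
theorem num_single_locs_spec : Claim_equal_num_single_locs := by
  intro rows _
  exact num_single_locs_spec_aux rows
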